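-- pv_equiv track=rewrite | github.com/gabrielSantillo/codility-coding-skills-parking-lot | neo.py | solution
-- ===== SOURCE A (Python) =====
-- def solution(A, D):
--     # initializing each variable as a list with 12 indexes to represent one year in months
--     payment = [0,0,0,0,0,0,0,0,0,0,0,0]
--     transfer = [0,0,0,0,0,0,0,0,0,0,0,0]
--     count = [0,0,0,0,0,0,0,0,0,0,0,0]
--
--     # looping trough the list A
--     for i in range(len(A)):
--         # splitting the the D list after each "-" in 3
--         date = D[i].split('-', 3)
--         year = int(date[0])
--         month = int(date[1])
--
--         # if the year is 2020
--         if(year == 2020):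
--             # if the at i the value is lower than 0
--             if(A[i] < 0):
--                 # In case of True, subtract to the payment list
--                 payment[month-1] -= A[i]
--                 # add one to the count list
--                 count[month-1] += 1
--             else:
--                 # in case of False, add to the transfer list
--                 transfer[month-1] += A[i]
--
--     # starting the balance as zero
--     balance = 0
--
--     # looping all months of the year
--     for i in range(12):
--         # balance is equal the transfer less payment
--         balance += transfer[i] - payment[i]
--         # if count is more than 3 or payment less than 100, subtract 5 from balance
--         if count[i] < 3 or payment[i] < 100:
--             balance -= 5
--
--     return balance
-- ===== SOURCE B (Python) =====
-- def solution(A, D):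
--     # stage 1: parse every transaction into (year, month, amount) rows
--     rows = []
--     for a, d in zip(A, D):
--         date = d.split('-', 3)
--         rows.append((int(date[0]), int(date[1]), a))
--     # stage 2: the balance before fees is the sum of all 2020 amounts
--     total = sum(a for y, _, a in rows if y == 2020)
--     # stage 3: for each month, rescan the rows for that month's card payments
--     fee = 0
--     for m in range(1, 13):
--         month_pays = [-a for y, mo, a in rows if y == 2020 and mo == m and a < 0]
--         if len(month_pays) < 3 or sum(month_pays) < 100:
--             fee += 5
--     return total - fee
-- ===== Notes on version B (the rewrite author's own statement) =====
-- stated objective: alternative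
-- what changed: B drops A's three month-indexed accumulator arrays entirely: it parses all rows once into (year,month,amount) tuples, takes one sum of every 2020 amount, then for each of the 12 months rescans the parsed rows to build that month's payment list and decide its 5-unit fee.
-- outside the precondition, e.g. on solution([-60, -60, -60], ['2020-12-01', '2020-12-02', '2020-0-03']): A returns -235, B returns -240
import Mathlib
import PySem

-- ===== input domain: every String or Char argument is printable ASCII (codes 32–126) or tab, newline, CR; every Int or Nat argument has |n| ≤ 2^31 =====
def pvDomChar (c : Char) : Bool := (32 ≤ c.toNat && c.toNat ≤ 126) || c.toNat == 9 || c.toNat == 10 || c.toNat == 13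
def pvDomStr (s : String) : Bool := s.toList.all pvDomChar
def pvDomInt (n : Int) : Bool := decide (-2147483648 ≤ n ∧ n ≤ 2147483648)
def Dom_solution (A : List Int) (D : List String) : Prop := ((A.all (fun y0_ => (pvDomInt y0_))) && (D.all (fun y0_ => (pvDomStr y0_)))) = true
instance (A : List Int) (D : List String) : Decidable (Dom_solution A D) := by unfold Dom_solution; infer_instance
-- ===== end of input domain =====

-- B drops A's three month-indexed accumulator arrays: it parses all rows once, sums every 2020
-- amount, then for each of the 12 months rescans the parsed rows to decide that month's fee
-- (objective: alternative decomposition; not faster).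

-- shared helper: `date = d.split('-', 3); year = int(date[0]); month = int(date[1])`
-- (the same three lines in both Pythons)
def pvParse2 (d : String) : Option (Int × Int) :=
  match PySem.Str.splitMax? d "-" 3 with
  | none => none
  | some date =>
    match (PySem.List.pyGet? date 0).bind PySem.Int.ofStr? with
    | none => none
    | some y =>
      match (PySem.List.pyGet? date 1).bind PySem.Int.ofStr? with
      | none => none
      | some m => some (y, m)

-- the literal `[0,0,0,0,0,0,0,0,0,0,0,0]` A starts from
def pvZeros12 : List Int := [0,0,0,0,0,0,0,0,0,0,0,0]

-- ===== PORT A =====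
-- state (payment, transfer, count); none = the Python raised (excluded by Pre_)
def pvStepA (A : List Int) (D : List String)
    (st : Option (List Int × List Int × List Int)) (i : Nat) :
    Option (List Int × List Int × List Int) :=
  st.bind fun ptc =>
    match PySem.List.pyGet? D (i : Int) with
    | none => none
    | some di =>
      match pvParse2 di with
      | none => none
      | some ym =>
        if ym.1 = 2020 then
          match PySem.List.pyGet? A (i : Int) with
          | none => none
          | some a =>
            if a < 0 then
              match PySem.List.pyGet? ptc.1 (ym.2 - 1) with
              | none => none
              | some pv =>
                match PySem.List.pySet? ptc.1 (ym.2 - 1) (pv - a) with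
                | none => none
                | some p' =>
                  match PySem.List.pyGet? ptc.2.2 (ym.2 - 1) with
                  | none => none
                  | some cv =>
                    match PySem.List.pySet? ptc.2.2 (ym.2 - 1) (cv + 1) with
                    | none => none
                    | some c' => some (p', ptc.2.1, c')
            else
              match PySem.List.pyGet? ptc.2.1 (ym.2 - 1) with
              | none => none
              | some tv =>
                match PySem.List.pySet? ptc.2.1 (ym.2 - 1) (tv + a) with
                | none => none
                | some t' => some (ptc.1, t', ptc.2.2)
        else some ptc

def solution (A : List Int) (D : List String) : Int :=
  match (List.range A.length).foldl (pvStepA A D) (some (pvZeros12, pvZeros12, pvZeros12)) with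
  | none => 0
  | some ptc =>
    (PySem.List.pyRange 0 12 1).foldl (fun balance i =>
      let b := balance + PySem.List.pyGetD ptc.2.1 i 0 - PySem.List.pyGetD ptc.1 i 0
      if PySem.List.pyGetD ptc.2.2 i 0 < 3 ∨ PySem.List.pyGetD ptc.1 i 0 < 100 then b - 5 else b) 0

-- ===== PORT B =====
-- stage 1 of Source B: build the parsed rows (year, month, amount); none = a parse raised
def pvRowsStep (st : Option (List (Int × Int × Int))) (ad : Int × String) :
    Option (List (Int × Int × Int)) :=
  st.bind fun rows =>
    match pvParse2 ad.2 with
    | none => none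
    | some ym => some (rows ++ [(ym.1, ym.2, ad.1)])

-- the comprehension `[-a for y, mo, a in rows if y == 2020 and mo == m and a < 0]`
def pvPays (R : List (Int × Int × Int)) (m : Int) : List Int :=
  (R.filter (fun r => decide (r.1 = 2020) && decide (r.2.1 = m) && decide (r.2.2 < 0))).map
    (fun r => -r.2.2)

def solution_alt (A : List Int) (D : List String) : Int :=
  match (A.zip D).foldl pvRowsStep (some []) with
  | none => 0
  | some R =>
    let total := R.foldl (fun s r => if r.1 = 2020 then s + r.2.2 else s) 0
    let fee := (PySem.List.pyRange 1 13 1).foldl (fun fee m =>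
      if (pvPays R m).length < 3 ∨ (pvPays R m).sum < 100 then fee + 5 else fee) 0
    total - fee

-- ===== PRECONDITION & SPEC =====
-- a row A reads: its date splits into an int year and an int month, month in 1..12 when year is 2020
def pvRowOK (d : String) : Bool :=
  match pvParse2 d with
  | none => false
  | some ym => ym.1 != 2020 || (decide (1 ≤ ym.2) && decide (ym.2 ≤ 12))

-- Pre_ excludes the inputs where A raises (D shorter than A, an unparsable date, a 2020 month > 12
-- or < -11, all IndexError/ValueError) and also 2020-dated rows whose parsed month lies in -11..0:
-- such a month is not a calendar month, so which bucket the row belongs to is unspecified — A files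
-- it under month 12+month via Python negative indexing, B leaves it out of every month's fee test
-- (both defensible; one differing excluded example is cited in claim.json).
def Pre_solution (A : List Int) (D : List String) : Prop :=
  A.length ≤ D.length ∧ (D.take A.length).all pvRowOK = true
instance (A : List Int) (D : List String) : Decidable (Pre_solution A D) := by
  unfold Pre_solution; infer_instance

def pvWitness_solution : List Int × List String :=
  ([120, -50, -60, -70], ["2020-01-05", "2020-1-06", "2020-01-07", "2020-1-08"])

def Spec_solution (A : List Int) (D : List String) (out : Int) : Prop := out = solution_alt A D
instance (A : List Int) (D : List String) (out : Int) : Decidable (Spec_solution A D out) := by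
  unfold Spec_solution; infer_instance

-- ===== CLAIM (what is proved, stated in full; the proofs are below) =====
def Claim_equal_solution : Prop := ∀ (A : List Int) (D : List String),
  Dom_solution A D → Pre_solution A D → Spec_solution A D (solution A D)

-- ===== LEMMAS AND PROOFS =====

-- the transfers of month m among the parsed rows (the a ≥ 0 branch of A)
def pvTrans (R : List (Int × Int × Int)) (m : Int) : List Int :=
  (R.filter (fun r => decide (r.1 = 2020) && decide (r.2.1 = m) && !decide (r.2.2 < 0))).map
    (fun r => r.2.2)

-- A's three arrays, characterised per bucket from the parsed rows
def pvPmap (R : List (Int × Int × Int)) : List Int :=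
  (List.range 12).map (fun k : Nat => (pvPays R ((k : Int) + 1)).sum)
def pvCmap (R : List (Int × Int × Int)) : List Int :=
  (List.range 12).map (fun k : Nat => ((pvPays R ((k : Int) + 1)).length : Int))
def pvTmap (R : List (Int × Int × Int)) : List Int :=
  (List.range 12).map (fun k : Nat => (pvTrans R ((k : Int) + 1)).sum)

lemma pvPmap_length (R : List (Int × Int × Int)) : (pvPmap R).length = 12 := by simp [pvPmap]
lemma pvCmap_length (R : List (Int × Int × Int)) : (pvCmap R).length = 12 := by simp [pvCmap]
lemma pvTmap_length (R : List (Int × Int × Int)) : (pvTmap R).length = 12 := by simp [pvTmap]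

lemma pvPays_append (R : List (Int × Int × Int)) (r : Int × Int × Int) (m : Int) :
    pvPays (R ++ [r]) m
      = pvPays R m ++ (if r.1 = 2020 ∧ r.2.1 = m ∧ r.2.2 < 0 then [-r.2.2] else []) := by
  unfold pvPays
  rw [List.filter_append, List.map_append]
  congr 1
  by_cases h1 : r.1 = 2020 <;> by_cases h2 : r.2.1 = m <;> by_cases h3 : r.2.2 < 0 <;>
    simp [List.filter, h1, h2, h3]

lemma pvTrans_append (R : List (Int × Int × Int)) (r : Int × Int × Int) (m : Int) :
    pvTrans (R ++ [r]) m
      = pvTrans R m ++ (if r.1 = 2020 ∧ r.2.1 = m ∧ ¬ r.2.2 < 0 then [r.2.2] else []) := by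
  unfold pvTrans
  rw [List.filter_append, List.map_append]
  congr 1
  by_cases h1 : r.1 = 2020 <;> by_cases h2 : r.2.1 = m <;> by_cases h3 : r.2.2 < 0 <;>
    simp [List.filter, h1, h2, h3]

lemma map_range12_congr (f g : Nat → Int) (hg : ∀ k, k < 12 → g k = f k) :
    (List.range 12).map g = (List.range 12).map f :=
  List.map_congr_left (fun k hk => hg k (List.mem_range.mp hk))

lemma map_range12_set (f g : Nat → Int) (idx : Nat) (v : Int) (hidx : idx < 12)
    (hg : ∀ k, k < 12 → g k = if k = idx then f k + v else f k) :
    (List.range 12).map g = ((List.range 12).map f).set idx (f idx + v) := by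
  apply List.ext_getElem
  · simp
  · intro k hk1 hk2
    have hk : k < 12 := by simpa using hk1
    simp only [List.getElem_map, List.getElem_range, List.getElem_set]
    rw [hg k hk]
    by_cases h : k = idx
    · subst h; simp
    · have h' : idx ≠ k := fun h'' => h h''.symm
      simp [h, h']

lemma getD_map_range12 (f : Nat → Int) (k : Nat) (hk : k < 12) :
    ((List.range 12).map f).getD k 0 = f k := by
  rw [List.getD_eq_getElem?_getD]
  simp [List.getElem?_map, List.getElem?_range hk]

-- Python index month-1 into a 12-list, month in 1..12
lemma pv_get_month (l : List Int) (m : Int) (h : l.length = 12) (h1 : 1 ≤ m) (h2 : m ≤ 12) :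
    PySem.List.pyGet? l (m - 1) = some (l.getD (m.toNat - 1) 0) := by
  have hidx : (m - 1).toNat = m.toNat - 1 := by omega
  have hlt : m.toNat - 1 < l.length := by omega
  simp only [PySem.List.pyGet?, PySem.List.pyIdx?, h]
  split_ifs with h3 h4 <;> try omega
  rw [hidx]
  simp only [Option.bind_some, List.getElem?_eq_getElem (by omega : m.toNat - 1 < l.length),
    List.getD_eq_getElem?_getD, Option.getD_some]

lemma pv_set_month (l : List Int) (m : Int) (h : l.length = 12) (h1 : 1 ≤ m) (h2 : m ≤ 12)
    (v : Int) : PySem.List.pySet? l (m - 1) v = some (l.set (m.toNat - 1) v) := by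
  have hidx : (m - 1).toNat = m.toNat - 1 := by omega
  simp only [PySem.List.pySet?, PySem.List.pyIdx?, h]
  split_ifs with h3 h4 <;> try omega
  rw [hidx]; rfl

lemma pv_sum_set (l : List Int) (k : Nat) (h : k < l.length) (v : Int) :
    (l.set k v).sum = l.sum - l.getD k 0 + v := by
  have hs := List.sum_set l k v
  simp [h] at hs
  rw [hs]
  have h1 : l.getD k 0 = l[k] := by simp [List.getD_eq_getElem?_getD, List.getElem?_eq_getElem h]
  have h2 : (List.take k l).sum + (List.drop k l).sum = l.sum := by
    rw [← List.sum_append, List.take_append_drop]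
  rw [h1]; linarith

lemma pvPmap_nil : pvPmap [] = pvZeros12 := by decide
lemma pvCmap_nil : pvCmap [] = pvZeros12 := by decide
lemma pvTmap_nil : pvTmap [] = pvZeros12 := by decide

-- joint invariant: after n rows, B's row list is R, A's state is the per-bucket characterisation
-- of R, and B's running total equals transfers-minus-payments over all buckets
lemma pv_inv (A : List Int) (D : List String) (hlen : A.length ≤ D.length)
    (hrows : ∀ i, i < A.length → pvRowOK (D.getD i "") = true) :
    ∀ n, n ≤ A.length → ∃ R : List (Int × Int × Int),
      ((A.zip D).take n).foldl pvRowsStep (some []) = some R ∧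
      (List.range n).foldl (pvStepA A D) (some (pvZeros12, pvZeros12, pvZeros12))
        = some (pvPmap R, pvTmap R, pvCmap R) ∧
      R.foldl (fun s r => if r.1 = 2020 then s + r.2.2 else s) 0
        = (pvTmap R).sum - (pvPmap R).sum := by
  intro n
  induction n with
  | zero =>
    intro _
    exact ⟨[], by simp, by simp [pvPmap_nil, pvCmap_nil, pvTmap_nil], by decide⟩
  | succ n ih =>
    intro hn1
    obtain ⟨R, hB, hA, htot⟩ := ih (by omega)
    have hnA : n < A.length := by omega
    have hnD : n < D.length := by omega
    have hgd : D.getD n "" = D[n] := by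
      simp [List.getD_eq_getElem?_getD, List.getElem?_eq_getElem hnD]
    have hrow := hrows n hnA
    rw [hgd] at hrow
    unfold pvRowOK at hrow
    -- the zip prefix grows by the pair (A[n], D[n])
    have hzlen : n < (A.zip D).length := by simp [List.length_zip]; omega
    have hzn : (A.zip D)[n]? = some (A[n], D[n]) := by
      rw [List.getElem?_eq_getElem hzlen]; simp
    have hztake : (A.zip D).take (n + 1) = (A.zip D).take n ++ [(A[n], D[n])] := by
      rw [List.take_add_one, hzn]; rfl
    rcases hparse : pvParse2 D[n] with _ | ym
    · rw [hparse] at hrow; simp at hrow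
    rw [hparse] at hrow
    simp only [Bool.or_eq_true, bne_iff_ne, Bool.and_eq_true, decide_eq_true_eq] at hrow
    have hDn : PySem.List.pyGet? D ((n : Nat) : Int) = some D[n] := by
      rw [PySem.List.pyGet?_natCast, List.getElem?_eq_getElem hnD]
    have hAn : PySem.List.pyGet? A ((n : Nat) : Int) = some A[n] := by
      rw [PySem.List.pyGet?_natCast, List.getElem?_eq_getElem hnA]
    have hBstep : ((A.zip D).take (n + 1)).foldl pvRowsStep (some [])
        = some (R ++ [(ym.1, ym.2, A[n])]) := by
      rw [hztake, List.foldl_append, hB, List.foldl_cons, List.foldl_nil]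
      simp only [pvRowsStep, Option.bind_some, hparse]
    set r : Int × Int × Int := (ym.1, ym.2, A[n]) with hr
    by_cases hy : ym.1 = 2020
    · have hm : 1 ≤ ym.2 ∧ ym.2 ≤ 12 := by
        rcases hrow with h' | h'
        · exact absurd hy h'
        · exact h'
      set idx : Nat := ym.2.toNat - 1 with hidxdef
      have hidx : idx < 12 := by omega
      have hki : ∀ k : Nat, k < 12 → ((k : Int) + 1 = ym.2 ↔ k = idx) := by
        intro k _; omega
      by_cases ha : A[n] < 0
      · -- payment row: pay bucket idx gains -a, count bucket idx gains 1
        have hP : pvPmap (R ++ [r])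
            = (pvPmap R).set idx ((pvPays R ((idx : Int) + 1)).sum + (-A[n])) := by
          unfold pvPmap
          refine map_range12_set _ _ _ _ hidx ?_
          intro k hk
          rw [pvPays_append]
          by_cases hkidx : k = idx
          · rw [if_pos ⟨hy, ((hki k hk).mpr hkidx).symm, ha⟩, if_pos hkidx]
            simp [hr]
          · rw [if_neg (fun hcond => hkidx ((hki k hk).mp hcond.2.1.symm)), if_neg hkidx]
            simp
        have hC : pvCmap (R ++ [r])
            = (pvCmap R).set idx (((pvPays R ((idx : Int) + 1)).length : Int) + 1) := by
          unfold pvCmap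
          refine map_range12_set _ _ _ _ hidx ?_
          intro k hk
          rw [pvPays_append]
          by_cases hkidx : k = idx
          · rw [if_pos ⟨hy, ((hki k hk).mpr hkidx).symm, ha⟩, if_pos hkidx]
            simp [hr]
            try push_cast
            try ring
          · rw [if_neg (fun hcond => hkidx ((hki k hk).mp hcond.2.1.symm)), if_neg hkidx]
            simp
        have hT : pvTmap (R ++ [r]) = pvTmap R := by
          unfold pvTmap
          apply map_range12_congr
          intro k hk
          rw [pvTrans_append, if_neg (fun hcond => hcond.2.2 ha)]
          simp
        refine ⟨R ++ [r], hBstep, ?_, ?_⟩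
        · rw [List.range_succ, List.foldl_append, List.foldl_cons, List.foldl_nil, hA]
          have hgetp := pv_get_month (pvPmap R) ym.2 (pvPmap_length R) hm.1 hm.2
          have hgetc := pv_get_month (pvCmap R) ym.2 (pvCmap_length R) hm.1 hm.2
          have hgdp : (pvPmap R).getD (ym.2.toNat - 1) 0 = (pvPays R ((idx : Int) + 1)).sum := by
            exact getD_map_range12 _ idx hidx
          have hgdc : (pvCmap R).getD (ym.2.toNat - 1) 0
              = ((pvPays R ((idx : Int) + 1)).length : Int) := by
            exact getD_map_range12 _ idx hidx
          simp only [pvStepA, Option.bind_some, hDn, hparse, hAn, if_pos hy, if_pos ha,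
            hgetp, hgetc, hgdp, hgdc,
            pv_set_month (pvPmap R) ym.2 (pvPmap_length R) hm.1 hm.2,
            pv_set_month (pvCmap R) ym.2 (pvCmap_length R) hm.1 hm.2]
          rw [hP, hC, hT]
          congr 3
        · rw [List.foldl_append, List.foldl_cons, List.foldl_nil, htot, hT, hP]
          have := pv_sum_set (pvPmap R) idx (by rw [pvPmap_length]; omega)
            ((pvPays R ((idx : Int) + 1)).sum + (-A[n]))
          rw [this, show (pvPmap R).getD idx 0 = (pvPays R ((idx : Int) + 1)).sum from
            getD_map_range12 _ idx hidx]
          simp only [hr, if_pos hy]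
          ring
      · -- transfer row: transfer bucket idx gains a
        have hT : pvTmap (R ++ [r])
            = (pvTmap R).set idx ((pvTrans R ((idx : Int) + 1)).sum + A[n]) := by
          unfold pvTmap
          refine map_range12_set _ _ _ _ hidx ?_
          intro k hk
          rw [pvTrans_append]
          by_cases hkidx : k = idx
          · rw [if_pos ⟨hy, ((hki k hk).mpr hkidx).symm, ha⟩, if_pos hkidx]
            simp [hr]
          · rw [if_neg (fun hcond => hkidx ((hki k hk).mp hcond.2.1.symm)), if_neg hkidx]
            simp
        have hP : pvPmap (R ++ [r]) = pvPmap R := by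
          unfold pvPmap
          apply map_range12_congr
          intro k hk
          rw [pvPays_append, if_neg (fun hcond => ha hcond.2.2)]
          simp
        have hC : pvCmap (R ++ [r]) = pvCmap R := by
          unfold pvCmap
          apply map_range12_congr
          intro k hk
          rw [pvPays_append, if_neg (fun hcond => ha hcond.2.2)]
          simp
        refine ⟨R ++ [r], hBstep, ?_, ?_⟩
        · rw [List.range_succ, List.foldl_append, List.foldl_cons, List.foldl_nil, hA]
          have hgdt : (pvTmap R).getD (ym.2.toNat - 1) 0 = (pvTrans R ((idx : Int) + 1)).sum := by
            exact getD_map_range12 _ idx hidx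
          simp only [pvStepA, Option.bind_some, hDn, hparse, hAn, if_pos hy, if_neg ha,
            pv_get_month (pvTmap R) ym.2 (pvTmap_length R) hm.1 hm.2, hgdt,
            pv_set_month (pvTmap R) ym.2 (pvTmap_length R) hm.1 hm.2]
          rw [hP, hC, hT]
        · rw [List.foldl_append, List.foldl_cons, List.foldl_nil, htot, hT, hP]
          have := pv_sum_set (pvTmap R) idx (by rw [pvTmap_length]; omega)
            ((pvTrans R ((idx : Int) + 1)).sum + A[n])
          rw [this, show (pvTmap R).getD idx 0 = (pvTrans R ((idx : Int) + 1)).sum from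
            getD_map_range12 _ idx hidx]
          simp only [hr, if_pos hy]
          ring
    · -- year ≠ 2020: nothing changes
      have hP : pvPmap (R ++ [r]) = pvPmap R := by
        unfold pvPmap
        apply map_range12_congr
        intro k hk
        rw [pvPays_append, if_neg (fun hcond => hy hcond.1)]
        simp
      have hC : pvCmap (R ++ [r]) = pvCmap R := by
        unfold pvCmap
        apply map_range12_congr
        intro k hk
        rw [pvPays_append, if_neg (fun hcond => hy hcond.1)]
        simp
      have hT : pvTmap (R ++ [r]) = pvTmap R := by
        unfold pvTmap
        apply map_range12_congr
        intro k hk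
        rw [pvTrans_append, if_neg (fun hcond => hy hcond.1)]
        simp
      refine ⟨R ++ [r], hBstep, ?_, ?_⟩
      · rw [List.range_succ, List.foldl_append, List.foldl_cons, List.foldl_nil, hA]
        simp only [pvStepA, Option.bind_some, hDn, hparse, if_neg hy]
        rw [hP, hC, hT]
      · rw [List.foldl_append, List.foldl_cons, List.foldl_nil, htot, hT, hP]
        simp only [hr, if_neg hy]

-- A's closing balance loop in closed form: prefix sums minus 5 per non-exempt month
lemma pv_bal (t p c : List Int) :
    ∀ (n : Nat), n ≤ t.length → n ≤ p.length → ∀ (b0 : Int),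
      (PySem.List.pyRange 0 (n : Int) 1).foldl (fun balance i =>
          let b := balance + PySem.List.pyGetD t i 0 - PySem.List.pyGetD p i 0
          if PySem.List.pyGetD c i 0 < 3 ∨ PySem.List.pyGetD p i 0 < 100 then b - 5 else b) b0
      = b0 + ((t.take n).sum - (p.take n).sum)
        - 5 * (((PySem.List.pyRange 0 (n : Int) 1).countP (fun m =>
            decide (PySem.List.pyGetD c m 0 < 3 ∨ PySem.List.pyGetD p m 0 < 100))) : Int) := by
  intro n
  induction n with
  | zero => intro _ _ b0; simp [PySem.List.pyRange_one_eq_nil]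
  | succ n ih =>
    intro hnt hnp b0
    have hltt : n < t.length := by omega
    have hltp : n < p.length := by omega
    have hcast : ((n + 1 : Nat) : Int) = (n : Int) + 1 := by push_cast; ring
    have htn : t[n]?.toList = [t[n]] := by simp [List.getElem?_eq_getElem hltt]
    have hpn : p[n]?.toList = [p[n]] := by simp [List.getElem?_eq_getElem hltp]
    rw [hcast, PySem.List.pyRange_one_succ_right (by positivity),
        List.foldl_append, List.foldl_cons, List.foldl_nil,
        List.countP_append, ih (by omega) (by omega) b0,
        List.take_add_one, List.take_add_one, htn, hpn]
    simp only [PySem.List.pyGetD_natCast, List.countP_cons, List.countP_nil,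
      List.sum_append, List.sum_cons, List.sum_nil]
    have hgt : t.getD n 0 = t[n] := by
      simp [List.getD_eq_getElem?_getD, List.getElem?_eq_getElem hltt]
    have hgp : p.getD n 0 = p[n] := by
      simp [List.getD_eq_getElem?_getD, List.getElem?_eq_getElem hltp]
    rw [hgt, hgp]
    by_cases hcond : (c.getD n 0 < 3 ∨ p[n] < 100)
    · simp only [hcond, decide_true, if_true]
      push_cast; ring
    · simp only [hcond, decide_false, if_false]
      push_cast; ring

lemma pv_solution_eq (A : List Int) (D : List String) (ptc : List Int × List Int × List Int)
    (h : (List.range A.length).foldl (pvStepA A D) (some (pvZeros12, pvZeros12, pvZeros12))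
          = some ptc) :
    solution A D = (PySem.List.pyRange 0 12 1).foldl (fun balance i =>
      let b := balance + PySem.List.pyGetD ptc.2.1 i 0 - PySem.List.pyGetD ptc.1 i 0
      if PySem.List.pyGetD ptc.2.2 i 0 < 3 ∨ PySem.List.pyGetD ptc.1 i 0 < 100 then b - 5 else b)
      0 := by
  unfold solution; rw [h]

lemma pv_alt_eq (A : List Int) (D : List String) (R : List (Int × Int × Int))
    (h : (A.zip D).foldl pvRowsStep (some []) = some R) :
    solution_alt A D =
      R.foldl (fun s r => if r.1 = 2020 then s + r.2.2 else s) 0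
        - (PySem.List.pyRange 1 13 1).foldl (fun fee m =>
            if (pvPays R m).length < 3 ∨ (pvPays R m).sum < 100 then fee + 5 else fee) 0 := by
  unfold solution_alt; rw [h]

-- B's fee loop as 5 times a count
lemma pv_foldl_fee (R : List (Int × Int × Int)) (l : List Int) : ∀ c : Int,
    l.foldl (fun fee m =>
        if (pvPays R m).length < 3 ∨ (pvPays R m).sum < 100 then fee + 5 else fee) c
      = c + 5 * ((l.countP (fun m =>
          decide ((pvPays R m).length < 3 ∨ (pvPays R m).sum < 100))) : Int) := by
  induction l with
  | nil => intro c; simp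
  | cons x l ih =>
    intro c
    rw [List.foldl_cons, List.countP_cons, ih]
    by_cases h : (pvPays R x).length < 3 ∨ (pvPays R x).sum < 100 <;>
      simp [h]; ring

lemma pv_pyGetD_Pmap (R : List (Int × Int × Int)) (i : Int) (h0 : 0 ≤ i) (h1 : i < 12) :
    PySem.List.pyGetD (pvPmap R) i 0 = (pvPays R (i + 1)).sum := by
  obtain ⟨k, rfl⟩ : ∃ k : Nat, i = (k : Int) := ⟨i.toNat, by omega⟩
  rw [PySem.List.pyGetD_natCast]
  exact getD_map_range12 _ k (by omega)

lemma pv_pyGetD_Cmap (R : List (Int × Int × Int)) (i : Int) (h0 : 0 ≤ i) (h1 : i < 12) :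
    PySem.List.pyGetD (pvCmap R) i 0 = ((pvPays R (i + 1)).length : Int) := by
  obtain ⟨k, rfl⟩ : ∃ k : Nat, i = (k : Int) := ⟨i.toNat, by omega⟩
  rw [PySem.List.pyGetD_natCast]
  exact getD_map_range12 _ k (by omega)

-- the shifted counts agree: month m = bucket m-1
lemma pv_count_shift (R : List (Int × Int × Int)) :
    ((PySem.List.pyRange 1 13 1).countP (fun m =>
        decide ((pvPays R m).length < 3 ∨ (pvPays R m).sum < 100)))
    = ((PySem.List.pyRange 0 12 1).countP (fun i =>
        decide (PySem.List.pyGetD (pvCmap R) i 0 < 3 ∨ PySem.List.pyGetD (pvPmap R) i 0 < 100))) := by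
  have hmap : (PySem.List.pyRange 0 12 1).map (fun i => i + 1) = PySem.List.pyRange 1 13 1 := by
    decide
  rw [← hmap, List.countP_map]
  apply List.countP_congr
  intro i hi
  obtain ⟨h0, h1⟩ := (PySem.List.mem_pyRange_one).mp hi
  rw [pv_pyGetD_Cmap R i h0 h1, pv_pyGetD_Pmap R i h0 h1]
  simp only [Function.comp]
  simp only [decide_eq_true_eq]
  omega

-- ===== VERDICT (by name: the statement is the Claim_ definition above) =====
theorem solution_spec : Claim_equal_solution := by
  intro A D _ hpre
  obtain ⟨hlen, hall⟩ := hpre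
  have hrows : ∀ i, i < A.length → pvRowOK (D.getD i "") = true := by
    intro i hi
    have hiD : i < D.length := by omega
    have hgd : D.getD i "" = D[i] := by
      simp [List.getD_eq_getElem?_getD, List.getElem?_eq_getElem hiD]
    have hmem : D[i] ∈ D.take A.length := by
      have hlt : i < (D.take A.length).length := by simp; omega
      have : (D.take A.length)[i] = D[i] := List.getElem_take
      rw [← this]
      exact List.getElem_mem hlt
    rw [hgd]
    exact List.all_eq_true.mp hall _ hmem
  obtain ⟨R, hB, hA, htot⟩ := pv_inv A D hlen hrows A.length (le_refl _)
  have hzfull : (A.zip D).take A.length = A.zip D := by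
    apply List.take_of_length_le
    simp [List.length_zip]
  rw [hzfull] at hB
  unfold Spec_solution
  rw [pv_solution_eq A D (pvPmap R, pvTmap R, pvCmap R) hA, pv_alt_eq A D R hB]
  have h12 : ((12 : Nat) : Int) = (12 : Int) := rfl
  have hbal := pv_bal (pvTmap R) (pvPmap R) (pvCmap R) 12
    (by rw [pvTmap_length]) (by rw [pvPmap_length]) 0
  rw [h12] at hbal
  rw [hbal, List.take_of_length_le (by rw [pvTmap_length]),
      List.take_of_length_le (by rw [pvPmap_length]),
      htot, pv_foldl_fee R _ 0, pv_count_shift R]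
  ring
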